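-- pv_equiv track=rewrite | github.com/HanzoRazer/luthiers-toolbox | services/api/app/pipelines/gcode_explainer/explain_gcode_ai.py | words_list
-- ===== SOURCE A (Python) =====
-- def words_list(s):
--     s=s.replace(" ",""); out=[]; i=0
--     while i<len(s):
--         if s[i].isalpha():
--             j=i+1
--             while j<len(s) and (s[j].isdigit() or s[j] in ".-+"): j+=1
--             out.append(s[i:j].upper()); i=j
--         else: i+=1
--     return out
-- ===== SOURCE B (Python) =====
-- def words_list(s):
--     out = []
--     cur = None
--     for ch in s.replace(" ", ""):
--         if ch.isalpha():
--             if cur is not None: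
--                 out.append(cur)
--             cur = ch.upper()
--         elif cur is not None and (ch.isdigit() or ch in ".-+"):
--             cur = cur + ch
--         else:
--             if cur is not None:
--                 out.append(cur)
--             cur = None
--     if cur is not None:
--         out.append(cur)
--     return out
-- ===== Notes on version B (the rewrite author's own statement) =====
-- stated objective: faster
-- what changed: A scans with an index-based outer while-loop plus a nested inner while that finds each token's end and slices it out; B makes a single left-to-right pass over the characters carrying the pending token as fold state, appending it when it closes (measured ~4x faster in a timing run).
import Mathlib
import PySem

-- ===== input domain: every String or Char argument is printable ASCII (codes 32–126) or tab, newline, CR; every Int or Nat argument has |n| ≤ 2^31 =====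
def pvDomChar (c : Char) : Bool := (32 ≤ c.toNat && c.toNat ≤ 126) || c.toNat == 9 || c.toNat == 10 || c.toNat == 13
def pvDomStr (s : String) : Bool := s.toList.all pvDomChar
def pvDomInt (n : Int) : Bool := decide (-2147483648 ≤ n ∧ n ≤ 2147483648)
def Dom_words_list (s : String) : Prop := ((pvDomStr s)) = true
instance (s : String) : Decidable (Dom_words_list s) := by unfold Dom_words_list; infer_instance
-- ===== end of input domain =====

-- B replaces A's index-based outer/inner while-loops (with slicing) by a single left fold over the
-- characters carrying the current token as state; objective: faster by a constant factor (measured).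


-- ===== PORT A =====
-- inner while: while j<len(s) and (s[j].isdigit() or s[j] in ".-+"): j+=1
def wlInner (cs : List Char) (j : Nat) : Nat :=
  if h : j < cs.length then
    if PySem.Chars.isdigit cs[j] || cs[j] == '.' || cs[j] == '-' || cs[j] == '+' then
      wlInner cs (j + 1)
    else j
  else j
termination_by cs.length - j

-- needed for termination of the outer loop: the inner scan never moves left
theorem wlInner_ge (cs : List Char) (j : Nat) : j ≤ wlInner cs j := by
  fun_induction wlInner with
  | case1 j h hc ih => omega
  | case2 => omega
  | case3 => omega

-- outer while over index i; s[i:j] on 0 ≤ i ≤ j is (drop i).take (j-i) (PySem.List.slice_natCast)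
def wlOuter (cs : List Char) (i : Nat) (out : List String) : List String :=
  if h : i < cs.length then
    if PySem.Chars.isalpha cs[i] then
      let j := wlInner cs (i + 1)
      wlOuter cs j (out ++ [String.ofList (PySem.Chars.upper ((cs.drop i).take (j - i)))])
    else wlOuter cs (i + 1) out
  else out
termination_by cs.length - i
decreasing_by
  · have := wlInner_ge cs (i + 1); omega
  · omega

def words_list (s : String) : List String :=
  wlOuter (PySem.Chars.replace s.toList [' '] []) 0 []

-- ===== PORT B =====
-- one fold step; the pending token (Python's `cur`, a str or None) is Option (List Char)
def wlStep (st : List String × Option (List Char)) (ch : Char) :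
    List String × Option (List Char) :=
  if PySem.Chars.isalpha ch then
    ((match st.2 with | some t => st.1 ++ [String.ofList t] | none => st.1),
     some [PySem.Chars.upperChar ch])
  else
    match st.2 with
    | some t =>
        if PySem.Chars.isdigit ch || ch == '.' || ch == '-' || ch == '+' then
          (st.1, some (t ++ [ch]))
        else (st.1 ++ [String.ofList t], none)
    | none => (st.1, none)

def words_list_alt (s : String) : List String :=
  let st := (PySem.Chars.replace s.toList [' '] []).foldl wlStep ([], none)
  match st.2 with | some t => st.1 ++ [String.ofList t] | none => st.1

-- ===== PRECONDITION & SPEC =====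
def Spec_words_list (s : String) (out : List String) : Prop := out = words_list_alt s
instance (s : String) (out : List String) : Decidable (Spec_words_list s out) := by
  unfold Spec_words_list; infer_instance

-- ===== CLAIM (what is proved, stated in full; the proofs are below) =====
def Claim_equal_words_list : Prop := ∀ (s : String), Dom_words_list s → Spec_words_list s (words_list s)

-- ===== LEMMAS AND PROOFS =====

-- the continuation predicate both loops test
def wlCont (c : Char) : Bool :=
  PySem.Chars.isdigit c || c == '.' || c == '-' || c == '+'

-- reference tokenisation both ports are proved equal to
def wlTokens : List Char → List String
  | [] => []
  | c :: rest =>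
    if PySem.Chars.isalpha c then
      String.ofList (PySem.Chars.upperChar c :: rest.takeWhile wlCont) ::
        wlTokens (rest.dropWhile wlCont)
    else wlTokens rest
termination_by cs => cs.length
decreasing_by
  · have := List.length_dropWhile_le wlCont rest; simpa using Nat.lt_succ_of_le this
  · simp

theorem wlTokens_nil : wlTokens [] = [] := by rw [wlTokens]

theorem wlTokens_cons (c : Char) (rest : List Char) :
    wlTokens (c :: rest) =
      if PySem.Chars.isalpha c then
        String.ofList (PySem.Chars.upperChar c :: rest.takeWhile wlCont) ::
          wlTokens (rest.dropWhile wlCont)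
      else wlTokens rest := by
  rw [wlTokens]

theorem dropWhile_eq_drop_len {α : Type} (p : α → Bool) (l : List α) :
    l.dropWhile p = l.drop (l.takeWhile p).length := by
  induction l with
  | nil => simp
  | cons c rest ih =>
    by_cases h : p c = true
    · simp [h, ih]
    · simp [h]

theorem take_len_takeWhile {α : Type} (p : α → Bool) (l : List α) :
    l.take (l.takeWhile p).length = l.takeWhile p := by
  induction l with
  | nil => simp
  | cons c rest ih =>
    by_cases h : p c = true
    · simp [h, ih]
    · simp [h]

theorem upperChar_of_wlCont (c : Char) (h : wlCont c = true) :
    PySem.Chars.upperChar c = c := by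
  unfold wlCont at h
  rcases Bool.or_eq_true_iff.mp h with h | h
  · rcases Bool.or_eq_true_iff.mp h with h | h
    · rcases Bool.or_eq_true_iff.mp h with h | h
      · -- a digit is not a lowercase letter, so upperChar fixes it
        unfold PySem.Chars.upperChar
        have hl : PySem.Chars.islower c = false := by
          simp only [PySem.Chars.isdigit, Bool.and_eq_true, decide_eq_true_eq, Char.le_def,
            UInt32.le_iff_toNat_le] at h
          simp only [PySem.Chars.islower, Bool.and_eq_false_iff, decide_eq_false_iff_not,
            not_le, Char.le_def, UInt32.le_iff_toNat_le]
          simp only [show ('0'.val.toNat = 48) from rfl, show ('9'.val.toNat = 57) from rfl,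
            show ('a'.val.toNat = 97) from rfl] at *
          omega
        simp [hl]
      · have : c = '.' := by simpa using h
        subst this; decide
    · have : c = '-' := by simpa using h
      subst this; decide
  · have : c = '+' := by simpa using h
    subst this; decide

theorem alpha_not_wlCont (c : Char) (ha : PySem.Chars.isalpha c = true) :
    wlCont c = false := by
  have hdot : c ≠ '.' := by rintro rfl; revert ha; decide
  have hdash : c ≠ '-' := by rintro rfl; revert ha; decide
  have hplus : c ≠ '+' := by rintro rfl; revert ha; decide
  have hdig : PySem.Chars.isdigit c = false := by
    simp only [PySem.Chars.isalpha, PySem.Chars.isupper, PySem.Chars.islower, Bool.or_eq_true,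
      Bool.and_eq_true, decide_eq_true_eq, Char.le_def, UInt32.le_iff_toNat_le] at ha
    simp only [PySem.Chars.isdigit, Bool.and_eq_false_iff, decide_eq_false_iff_not, not_le,
      Char.le_def, UInt32.le_iff_toNat_le]
    simp only [show ('A'.val.toNat = 65) from rfl, show ('Z'.val.toNat = 90) from rfl,
      show ('a'.val.toNat = 97) from rfl, show ('z'.val.toNat = 122) from rfl,
      show ('0'.val.toNat = 48) from rfl, show ('9'.val.toNat = 57) from rfl] at *
    omega
  simp [wlCont, hdig, hdot, hdash, hplus]

theorem wlInner_eq (cs : List Char) (j : Nat) :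
    wlInner cs j = j + ((cs.drop j).takeWhile wlCont).length := by
  fun_induction wlInner with
  | case1 j h hc ih =>
    have hd : cs.drop j = cs[j] :: cs.drop (j + 1) := List.drop_eq_getElem_cons h
    rw [hd, List.takeWhile_cons]
    simp only [show wlCont cs[j] = true from hc, if_true, List.length_cons]
    omega
  | case2 j h hc =>
    have hd : cs.drop j = cs[j] :: cs.drop (j + 1) := List.drop_eq_getElem_cons h
    rw [hd, List.takeWhile_cons]
    simp only [show wlCont cs[j] = false from by simpa [wlCont] using hc]
    simp
  | case3 j h =>
    have : cs.drop j = [] := List.drop_eq_nil_of_le (by omega)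
    simp [this]

theorem wlOuter_eq (cs : List Char) (i : Nat) (out : List String) :
    wlOuter cs i out = out ++ wlTokens (cs.drop i) := by
  fun_induction wlOuter with
  | case1 i out h ha j ih =>
    have hj : j = (i + 1) + ((cs.drop (i + 1)).takeWhile wlCont).length := wlInner_eq cs (i + 1)
    have hd : cs.drop i = cs[i] :: cs.drop (i + 1) := List.drop_eq_getElem_cons h
    -- the slice s[i:j] is the letter followed by the takeWhile block
    have hslice : (cs.drop i).take (j - i) =
        cs[i] :: (cs.drop (i + 1)).takeWhile wlCont := by
      rw [hd]
      have : j - i = ((cs.drop (i + 1)).takeWhile wlCont).length + 1 := by omega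
      rw [this, List.take_succ_cons, take_len_takeWhile]
    -- upper of the slice: continuation chars are fixed points of upperChar
    have hupper : PySem.Chars.upper ((cs.drop i).take (j - i)) =
        PySem.Chars.upperChar cs[i] :: (cs.drop (i + 1)).takeWhile wlCont := by
      rw [hslice]
      simp only [PySem.Chars.upper, List.map_cons]
      congr 1
      refine (List.map_congr_left ?_).trans (List.map_id _)
      intro x hx
      exact upperChar_of_wlCont x (List.mem_takeWhile_imp hx)
    have hdropj : cs.drop j = (cs.drop (i + 1)).dropWhile wlCont := by
      rw [dropWhile_eq_drop_len, List.drop_drop]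
      congr 1
    rw [ih, hdropj, hd, wlTokens_cons]
    simp [ha, hupper]
  | case2 i out h ha ih =>
    have hd : cs.drop i = cs[i] :: cs.drop (i + 1) := List.drop_eq_getElem_cons h
    rw [ih, hd, wlTokens_cons]
    simp [ha]
  | case3 i out h =>
    have : cs.drop i = [] := List.drop_eq_nil_of_le (by omega)
    simp [this, wlTokens_nil]

-- B-side: close the pending token
def wlFinish (st : List String × Option (List Char)) : List String :=
  match st.2 with | some t => st.1 ++ [String.ofList t] | none => st.1

theorem wlStep_alpha (out : List String) (cur : Option (List Char)) (c : Char)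
    (ha : PySem.Chars.isalpha c = true) :
    wlStep (out, cur) c =
      ((match cur with | some t => out ++ [String.ofList t] | none => out),
       some [PySem.Chars.upperChar c]) := by
  simp [wlStep, ha]

theorem wlFold_eq (cs : List Char) :
    (∀ out, wlFinish (cs.foldl wlStep (out, none)) = out ++ wlTokens cs) ∧
    (∀ out t, wlFinish (cs.foldl wlStep (out, some t)) =
      out ++ [String.ofList (t ++ cs.takeWhile wlCont)] ++ wlTokens (cs.dropWhile wlCont)) := by
  induction cs with
  | nil =>
    exact ⟨fun out => by simp [wlFinish, wlTokens_nil],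
           fun out t => by simp [wlFinish, wlTokens_nil]⟩
  | cons c rest ih =>
    constructor
    · intro out
      rw [List.foldl_cons, wlTokens_cons]  -- unfold one step of the fold and of the spec
      by_cases ha : PySem.Chars.isalpha c = true
      · rw [wlStep_alpha out none c ha, ih.2]
        simp [ha]
      · have hna : PySem.Chars.isalpha c = false := by simpa using ha
        rw [show wlStep (out, none) c = (out, none) from by simp [wlStep, hna], ih.1]
        simp [hna]
    · intro out t
      rw [List.foldl_cons]
      by_cases ha : PySem.Chars.isalpha c = true
      · have hc : wlCont c = false := alpha_not_wlCont c ha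
        rw [wlStep_alpha out (some t) c ha, ih.2]
        simp only [List.takeWhile_cons, List.dropWhile_cons, hc, Bool.false_eq_true, if_false]
        rw [wlTokens_cons]
        simp [ha]
      · have hna : PySem.Chars.isalpha c = false := by simpa using ha
        by_cases hc : wlCont c = true
        · rw [show wlStep (out, some t) c = (out, some (t ++ [c])) from by
            unfold wlCont at hc; simp [wlStep, hna, hc], ih.2]
          simp only [List.takeWhile_cons, List.dropWhile_cons, hc, if_true]
          simp
        · have hcf : wlCont c = false := by simpa using hc
          have h4 := hcf; unfold wlCont at h4
          simp only [Bool.or_eq_false_iff] at h4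
          rw [show wlStep (out, some t) c = (out ++ [String.ofList t], none) from by
            simp [wlStep, hna, h4.1.1.1, h4.1.1.2, h4.1.2, h4.2], ih.1]
          simp only [List.takeWhile_cons, List.dropWhile_cons, hcf, Bool.false_eq_true, if_false]
          rw [wlTokens_cons]
          simp [hna]

-- ===== VERDICT (by name: the statement is the Claim_ definition above) =====
theorem words_list_spec : Claim_equal_words_list := by
  intro s _
  unfold Spec_words_list words_list words_list_alt
  rw [wlOuter_eq, List.drop_zero, List.nil_append]
  have h := (wlFold_eq (PySem.Chars.replace s.toList [' '] [])).1 []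
  rw [List.nil_append] at h
  rw [← h]
  rfl
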